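-- pv_equiv track=rewrite | github.com/WouterTuinstra/Homeassistant-Growatt-Local-Modbus | scripts/show_settings.py | _split_registers
-- ===== SOURCE A (Python) =====
-- from typing import Any, Dict, Iterable, List, Mapping, Optional, Sequence
--
-- def _split_registers(value: int, length: int) -> List[int]:
--     """Split ``value`` into ``length`` 16-bit registers (big-endian)."""
--
--     if length <= 0:
--         return []
--     bits = length * 16
--     mask = (1 << bits) - 1
--     value &= mask
--     regs: List[int] = []
--     for shift in reversed(range(length)):
--         regs.append((value >> (shift * 16)) & 0xFFFF)
--     return regs
-- ===== SOURCE B (Python) =====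
-- def _split_registers(value, length):
--     """Split ``value`` into ``length`` 16-bit registers (big-endian)."""
--     if length <= 0:
--         return []
--     buf = (value & ((1 << (length * 16)) - 1)).to_bytes(length * 2, "big")
--     it = iter(buf)
--     return [(hi << 8) | lo for hi, lo in zip(it, it)]
-- ===== Notes on version B (the rewrite author's own statement) =====
-- stated objective: idiomatic
-- what changed: B serializes the masked value once with int.to_bytes into a big-endian byte buffer and combines consecutive byte pairs, instead of A's per-register shift-and-mask loop over reversed(range(length)).
import Mathlib
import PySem

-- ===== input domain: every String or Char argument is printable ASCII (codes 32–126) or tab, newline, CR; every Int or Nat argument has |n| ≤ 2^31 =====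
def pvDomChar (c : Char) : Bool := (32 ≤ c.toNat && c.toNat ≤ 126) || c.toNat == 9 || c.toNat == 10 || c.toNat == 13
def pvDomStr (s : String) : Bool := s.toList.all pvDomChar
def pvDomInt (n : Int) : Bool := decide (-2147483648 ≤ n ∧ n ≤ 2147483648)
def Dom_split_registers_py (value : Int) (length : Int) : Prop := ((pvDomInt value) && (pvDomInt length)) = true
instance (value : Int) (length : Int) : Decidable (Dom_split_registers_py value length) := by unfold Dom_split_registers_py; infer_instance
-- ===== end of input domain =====

-- B replaces A's per-register shift/mask loop by one big-endian byte serialization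
-- (int.to_bytes) followed by combining consecutive byte pairs; objective: idiomatic.

-- ===== PORT A =====
def split_registers_py (value : Int) (length : Int) : List Int :=
  if length ≤ 0 then []
  else
    let bits := length * 16
    let mask := ((1 : Int) <<< bits.toNat) - 1
    let v := PySem.Int.band value mask
    ((PySem.List.pyRange 0 length 1).reverse).foldl
      (fun regs shift => regs ++ [PySem.Int.band (v >>> (shift * 16).toNat) 0xFFFF]) []

-- ===== PORT B =====
-- port of (x).to_bytes(k, "big") for nonnegative x: big-endian byte list of exactly k bytes
def pvBytesBE (n : Nat) : Nat → List Int
  | 0 => []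
  | k + 1 => pvBytesBE (n / 256) k ++ [((n % 256 : Nat) : Int)]

-- port of the zip(it, it) pair comprehension: combine consecutive byte pairs
def pvPairUp : List Int → List Int
  | hi :: lo :: rest => (PySem.Int.bor (hi <<< 8) lo) :: pvPairUp rest
  | _ => []

def split_registers_py_alt (value : Int) (length : Int) : List Int :=
  if length ≤ 0 then []
  else
    let buf := pvBytesBE (PySem.Int.band value (((1 : Int) <<< (length * 16).toNat) - 1)).toNat
      (length * 2).toNat
    pvPairUp buf

-- ===== PRECONDITION & SPEC =====
def Spec_split_registers_py (value : Int) (length : Int) (out : List Int) : Prop := out = split_registers_py_alt value length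
instance (value : Int) (length : Int) (out : List Int) : Decidable (Spec_split_registers_py value length out) := by unfold Spec_split_registers_py; infer_instance

-- ===== CLAIM (what is proved, stated in full; the proofs are below) =====
def Claim_equal_split_registers_py : Prop := ∀ (value : Int) (length : Int), Dom_split_registers_py value length → Spec_split_registers_py value length (split_registers_py value length)

-- ===== LEMMAS AND PROOFS =====

theorem pvPairUp_append (xs ys : List Int) (h : xs.length % 2 = 0) :
    pvPairUp (xs ++ ys) = pvPairUp xs ++ pvPairUp ys := by
  match xs with
  | [] => simp [pvPairUp]
  | [a] => simp at h
  | a :: b :: xs' =>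
    simp only [List.cons_append, pvPairUp]
    rw [pvPairUp_append xs' ys (by simp at h; omega)]

theorem pvBytesBE_length (n k : Nat) : (pvBytesBE n k).length = k := by
  induction k generalizing n with
  | zero => simp [pvBytesBE]
  | succ k ih => simp [pvBytesBE, ih]

theorem pvPairUp_pair (x y : Nat) (hy : y < 256) :
    pvPairUp [(x : Int), (y : Int)] = [((x * 256 + y : Nat) : Int)] := by
  have hx : ((x : Int) <<< 8) = ((x <<< 8 : Nat) : Int) := by exact_mod_cast rfl
  simp only [pvPairUp, hx, PySem.Int.bor_natCast]
  rw [← Nat.shiftLeft_add_eq_or_of_lt (by omega : y < 2 ^ 8), Nat.shiftLeft_eq]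

-- core: B's pair-of-bytes list equals the big-endian register list
theorem pvCore (n m : Nat) :
    pvPairUp (pvBytesBE m (2 * n)) =
      ((List.range n).reverse).map (fun k => (((m >>> (k * 16)) &&& 65535 : Nat) : Int)) := by
  induction n generalizing m with
  | zero => simp [pvBytesBE, pvPairUp]
  | succ n ih =>
    have h2 : 2 * (n + 1) = (2 * n + 1) + 1 := by omega
    rw [h2]
    simp only [pvBytesBE]
    rw [List.append_assoc,
        pvPairUp_append _ _ (by rw [pvBytesBE_length]; omega),
        ih (m / 256 / 256)]
    have hpair : pvPairUp ([((m / 256 % 256 : Nat) : Int)] ++ [((m % 256 : Nat) : Int)]) =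
        [(((m >>> 0) &&& 65535 : Nat) : Int)] := by
      rw [List.singleton_append, pvPairUp_pair _ _ (by omega)]
      have : (m >>> 0) &&& 65535 = m % 65536 := by
        have := Nat.and_two_pow_sub_one_eq_mod m 16
        norm_num at this; simpa [Nat.shiftRight_zero] using this
      rw [this]
      have h65 : m / 256 % 256 * 256 + m % 256 = m % 65536 := by omega
      rw [h65]
    rw [hpair]
    have hrange : (List.range (n + 1)).reverse =
        ((List.range n).reverse).map (· + 1) ++ [0] := by
      rw [List.range_succ_eq_map]
      simp
    rw [hrange, List.map_append, List.map_map]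
    congr 1
    apply List.map_congr_left
    intro k _
    simp only [Function.comp_apply]
    congr 2
    have : m / 256 / 256 = m / 65536 := by omega
    rw [this, Nat.shiftRight_eq_div_pow, Nat.shiftRight_eq_div_pow,
        Nat.div_div_eq_div_mul]
    congr 1
    rw [show (k + 1) * 16 = k * 16 + 16 by ring, pow_add]
    norm_num
    ring

-- A-side: the folded loop as a map over the reversed range
theorem pvA_map (m : Nat) (len : Int) (hlen : 0 < len) :
    ((PySem.List.pyRange 0 len 1).reverse).foldl
      (fun regs shift => regs ++ [PySem.Int.band (((m : Int)) >>> (shift * 16).toNat) 0xFFFF]) [] =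
    ((List.range len.toNat).reverse).map (fun k => (((m >>> (k * 16)) &&& 65535 : Nat) : Int)) := by
  rw [PySem.List.foldl_append_singleton_eq_map, List.nil_append]
  have h : len = ((len.toNat : Nat) : Int) := by omega
  conv_lhs => rw [h, PySem.List.pyRange_zero_natCast]
  simp only [List.map_reverse, List.map_map]
  congr 1
  apply List.map_congr_left
  intro k _
  simp only [Function.comp_apply]
  have h1 : (((k : Int)) * 16).toNat = k * 16 := by
    have : ((k : Int)) * 16 = ((k * 16 : Nat) : Int) := by push_cast; ring
    rw [this, Int.toNat_natCast]
  rw [h1]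
  generalize (k * 16) = j
  have h2 : ((m : Int)) >>> (((j : Nat)) : Int) = ((m >>> j : Nat) : Int) := by simp
  rw [h2]
  have h3 : (0xFFFF : Int) = ((65535 : Nat) : Int) := by norm_num
  rw [h3, PySem.Int.band_natCast]

-- ===== VERDICT (by name: the statement is the Claim_ definition above) =====
theorem split_registers_py_spec : Claim_equal_split_registers_py := by
  intro value length _
  unfold Spec_split_registers_py split_registers_py split_registers_py_alt
  by_cases hl : length ≤ 0
  · simp [hl]
  · simp only [hl, if_false]
    push Not at hl
    set mask : Int := ((1 : Int) <<< (length * 16).toNat) - 1 with hmask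
    have hmnn : 0 ≤ mask := by
      have : (1 : Int) ≤ (1 : Int) <<< (length * 16).toNat := by
        rw [Int.shiftLeft_eq]
        have : (1 : Int) ≤ 2 ^ (length * 16).toNat := one_le_pow₀ (by norm_num)
        simpa using this
      omega
    have hvnn : 0 ≤ PySem.Int.band value mask := by
      rw [PySem.Int.band_comm]
      exact PySem.Int.band_nonneg_of_nonneg_left value hmnn
    set m : Nat := (PySem.Int.band value mask).toNat with hm
    have hv : PySem.Int.band value mask = ((m : Nat) : Int) := by omega
    have hlen2 : (length * 2).toNat = 2 * length.toNat := by omega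
    rw [hlen2, pvCore length.toNat m, hv, pvA_map m length hl]
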